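-- pv_equiv track=rewrite | github.com/yang1young/SourceCodeClassify | Utils/CleanUtils.py | code_split
-- ===== SOURCE A (Python) =====
-- def code_split(code, isSplit):
--
--     if(isSplit):
--         numA = code.count("\n")
--         # print numA
--         codes = code.split("\n")
--         result = ""
--         count = 0
--         numBlock = 1
--         for item in codes:
--             count += 1
--             result = result + item + " "
--             # if(count!=len(codes)&count!=len(codes)-1):
--             # result = result +"$"
--             if ((count % 7 == 0) & (numA - count > 7)):
--                 result = result + '\n'
--                 numBlock += 1
--         # print (result+"\n", numBlock)
--         return (result + "\n", numBlock)
--     else: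
--         return (code.replace("\n", " ") + "\n", 1)
-- ===== SOURCE B (Python) =====
-- def code_split(code, isSplit):
--     if not isSplit:
--         return (code.replace("\n", " ") + "\n", 1)
--     numA = code.count("\n")
--     lines = code.split("\n")
--     chunks = [lines[i:i + 7] for i in range(0, len(lines), 7)]
--     parts = []
--     numBlock = 1
--     for j, ch in enumerate(chunks):
--         parts.append(" ".join(ch) + " ")
--         if len(ch) == 7 and numA - (j + 1) * 7 > 7:
--             parts.append("\n")
--             numBlock += 1
--     return ("".join(parts) + "\n", numBlock)
-- ===== Notes on version B (the rewrite author's own statement) =====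
-- stated objective: alternative
-- what changed: B replaces A's single line-by-line loop with mutable count/modulo bookkeeping by slicing the lines into chunks of 7, space-joining each chunk, and deciding the block boundary per chunk from its index and length.
import Mathlib
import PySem

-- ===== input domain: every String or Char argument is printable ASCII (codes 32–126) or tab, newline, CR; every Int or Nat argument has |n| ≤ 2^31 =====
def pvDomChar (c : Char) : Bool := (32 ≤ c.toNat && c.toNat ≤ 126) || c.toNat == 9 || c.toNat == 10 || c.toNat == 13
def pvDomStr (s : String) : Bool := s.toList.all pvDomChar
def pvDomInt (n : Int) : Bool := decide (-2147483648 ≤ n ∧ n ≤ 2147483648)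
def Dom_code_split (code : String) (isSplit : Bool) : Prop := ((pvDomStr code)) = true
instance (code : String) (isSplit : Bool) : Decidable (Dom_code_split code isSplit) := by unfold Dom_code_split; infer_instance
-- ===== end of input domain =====

-- B reformats by slicing the lines into chunks of 7 and space-joining each chunk,
-- deciding block boundaries from the chunk index, instead of A's per-line counter loop
-- (alternative decomposition, same cost). Strings are handled on the List Char side
-- (PySem.Chars) and packed with String.mk at the end, which is exact for Python's str.

-- ===== PORT A =====
-- loop body of A's 'for item in codes' (state: result, count, numBlock)
def pvStepA (numA : Int) (s : List Char × Int × Int) (item : List Char) : List Char × Int × Int :=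
  let count := s.2.1 + 1
  let result := s.1 ++ item ++ [' ']
  if PySem.Int.mod count 7 == 0 && decide (7 < numA - count) then
    (result ++ ['\n'], count, s.2.2 + 1)
  else
    (result, count, s.2.2)

def code_split (code : String) (isSplit : Bool) : String × Int :=
  if isSplit then
    let numA : Int := (PySem.Chars.count code.toList ['\n'] : Int)
    let codes := PySem.Chars.splitOn code.toList ['\n']
    let st := codes.foldl (pvStepA numA) ([], 0, 1)
    (String.mk (st.1 ++ ['\n']), st.2.2)
  else
    (String.mk (PySem.Chars.replace code.toList ['\n'] [' '] ++ ['\n']), 1)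

-- ===== PORT B =====
-- [lines[i:i+7] for i in range(0, len(lines), 7)]  (exact: successive 7-slices)
def pvChunks7 (l : List (List Char)) : List (List (List Char)) :=
  match l with
  | [] => []
  | a :: b :: c :: d :: e :: f :: g :: rest => [a, b, c, d, e, f, g] :: pvChunks7 rest
  | short => [short]

-- loop body of B's 'for j, ch in enumerate(chunks)' (state: accumulated parts, numBlock)
def pvStepB (numA : Int) (s : List Char × Int) (p : Int × List (List Char)) : List Char × Int :=
  let part := PySem.Chars.join [' '] p.2 ++ [' ']
  if p.2.length == 7 && decide (7 < numA - (p.1 + 1) * 7) then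
    (s.1 ++ part ++ ['\n'], s.2 + 1)
  else
    (s.1 ++ part, s.2)

def code_split_alt (code : String) (isSplit : Bool) : String × Int :=
  if !isSplit then
    (String.mk (PySem.Chars.replace code.toList ['\n'] [' '] ++ ['\n']), 1)
  else
    let numA : Int := (PySem.Chars.count code.toList ['\n'] : Int)
    let lines := PySem.Chars.splitOn code.toList ['\n']
    let chunks := pvChunks7 lines
    let st := (PySem.List.enumerate chunks 0).foldl (pvStepB numA) ([], 1)
    (String.mk (st.1 ++ ['\n']), st.2)

-- ===== PRECONDITION & SPEC =====
def Spec_code_split (code : String) (isSplit : Bool) (out : String × Int) : Prop := out = code_split_alt code isSplit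
instance (code : String) (isSplit : Bool) (out : String × Int) : Decidable (Spec_code_split code isSplit out) := by unfold Spec_code_split; infer_instance

-- ===== CLAIM (what is proved, stated in full; the proofs are below) =====
def Claim_equal_code_split : Prop := ∀ (code : String) (isSplit : Bool), Dom_code_split code isSplit → Spec_code_split code isSplit (code_split code isSplit)

-- ===== LEMMAS AND PROOFS =====

-- each line followed by a space, concatenated
def pvFlatSp (l : List (List Char)) : List Char := (l.map (fun x => x ++ [' '])).flatten

theorem pvJoinSp (x : List Char) (l : List (List Char)) :
    PySem.Chars.join [' '] (x :: l) ++ [' '] = pvFlatSp (x :: l) := by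
  induction l generalizing x with
  | nil => simp [PySem.Chars.join_singleton, pvFlatSp]
  | cons y t ih =>
    rw [PySem.Chars.join_cons_cons]
    have := ih y
    simp only [pvFlatSp, List.map_cons, List.flatten_cons] at *
    simp [List.append_assoc] at *
    simp [this]

theorem pvModNe (j i : Int) (h1 : 1 ≤ i) (h2 : i ≤ 6) : ¬ PySem.Int.mod (7 * j + i) 7 = 0 := by
  rw [PySem.Int.mod_eq_emod_of_pos (by norm_num)]
  omega

-- A's loop over a run of lines where the if never fires
theorem pvChunkA (numA : Int) (l : List (List Char)) :
    ∀ (r : List Char) (c nb : Int),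
    (∀ i : Nat, i < l.length → ¬ PySem.Int.mod (c + i + 1) 7 = 0) →
    l.foldl (pvStepA numA) (r, c, nb) = (r ++ pvFlatSp l, c + l.length, nb) := by
  induction l with
  | nil => intro r c nb _; simp [pvFlatSp]
  | cons x t ih =>
    intro r c nb h
    have h0 := h 0 (by simp)
    simp only [Nat.cast_zero, add_zero] at h0
    have hif : (PySem.Int.mod (c + 1) 7 == 0 && decide (7 < numA - (c + 1))) = false := by
      simp only [Bool.and_eq_false_iff]
      left
      simp only [beq_eq_false_iff_ne, ne_eq]
      exact h0
    simp only [List.foldl_cons, pvStepA, hif, Bool.false_eq_true, if_false]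
    rw [ih (r ++ x ++ [' ']) (c + 1) nb (by
      intro i hi
      have h1 := h (i + 1) (by simpa using Nat.succ_lt_succ hi)
      rw [show c + 1 + (i : Int) + 1 = c + ((i : Nat) + 1 : Nat) + 1 by push_cast; ring]
      exact h1)]
    simp only [Prod.mk.injEq, List.length_cons]
    refine ⟨by simp [pvFlatSp, List.append_assoc], by push_cast; ring, trivial⟩

theorem pvChunksShort (l : List (List Char)) (h : l.length < 7) :
    pvChunks7 l = if l = [] then [] else [l] := by
  rcases l with _ | ⟨a, _ | ⟨b, _ | ⟨c, _ | ⟨d, _ | ⟨e, _ | ⟨f, _ | ⟨g, rest⟩⟩⟩⟩⟩⟩⟩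
  · rfl
  · rfl
  · rfl
  · rfl
  · rfl
  · rfl
  · rfl
  · exfalso; simp only [List.length_cons] at h; omega

theorem pvMain (numA : Int) :
    ∀ (n : Nat) (l : List (List Char)), l.length ≤ n → ∀ (j : Nat) (r : List Char) (nb : Int),
    ((l.foldl (pvStepA numA) (r, 7 * (j : Int), nb)).1,
     (l.foldl (pvStepA numA) (r, 7 * (j : Int), nb)).2.2)
    = (PySem.List.enumerate (pvChunks7 l) (j : Int)).foldl (pvStepB numA) (r, nb) := by
  intro n
  induction n with
  | zero =>
    intro l hl j r nb
    have : l = [] := List.length_eq_zero_iff.mp (Nat.le_zero.mp hl)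
    subst this
    simp [pvChunks7]
  | succ n ih =>
    intro l hl j r nb
    by_cases hlen : 7 ≤ l.length
    · -- full chunk of 7
      rcases l with _ | ⟨a, _ | ⟨b, _ | ⟨c, _ | ⟨d, _ | ⟨e, _ | ⟨f, _ | ⟨g, rest⟩⟩⟩⟩⟩⟩⟩ <;>
        simp only [List.length_cons, List.length_nil] at hlen <;> try omega
      -- LHS: process a..f with pvChunkA, then g by hand, then rest by ih
      have hch : pvChunks7 (a :: b :: c :: d :: e :: f :: g :: rest)
          = [a, b, c, d, e, f, g] :: pvChunks7 rest := rfl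
      rw [hch, PySem.List.enumerate_cons]
      have hsplit : (a :: b :: c :: d :: e :: f :: g :: rest)
          = [a, b, c, d, e, f] ++ (g :: rest) := rfl
      rw [hsplit, List.foldl_append]
      rw [pvChunkA numA [a, b, c, d, e, f] r (7 * (j : Int)) nb (by
        intro i hi
        simp only [List.length_cons, List.length_nil] at hi
        rw [show 7 * (j : Int) + (i : Int) + 1 = 7 * (j : Int) + ((i : Int) + 1) by ring]
        exact pvModNe (j : Int) ((i : Int) + 1) (by omega) (by omega))]
      have hL6 : ((7 * (j : Int)) + ([a, b, c, d, e, f].length : Int)) = 7 * (j : Int) + 6 := by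
        norm_num
      rw [hL6]
      have hdvd : (7 : Int) ∣ 7 * (j : Int) + 6 + 1 := ⟨(j : Int) + 1, by ring⟩
      have hjoin : PySem.Chars.join [' '] [a, b, c, d, e, f, g] ++ [' ']
          = pvFlatSp [a, b, c, d, e, f, g] := pvJoinSp a [b, c, d, e, f, g]
      have hcond : numA - ((j : Int) + 1) * 7 = numA - (7 * (j : Int) + 6 + 1) := by ring
      have hrest : rest.length ≤ n := by
        simp only [List.length_cons] at hl
        omega
      have ihj := ih rest hrest (j + 1)
      have hj1 : ((j + 1 : Nat) : Int) = (j : Int) + 1 := by push_cast; ring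
      by_cases hcnd : 7 < numA - (7 * (j : Int) + 6 + 1)
      · have hg : pvStepA numA (r ++ pvFlatSp [a, b, c, d, e, f], 7 * (j : Int) + 6, nb) g
            = (r ++ pvFlatSp [a, b, c, d, e, f, g] ++ ['\n'], 7 * (j : Int) + 6 + 1, nb + 1) := by
          simp [pvStepA, hdvd, hcnd, pvFlatSp, List.append_assoc]
        have hB : pvStepB numA (r, nb) ((j : Int), [a, b, c, d, e, f, g])
            = (r ++ pvFlatSp [a, b, c, d, e, f, g] ++ ['\n'], nb + 1) := by
          simp only [pvStepB, hcond]
          simp [hcnd, ← hjoin, List.append_assoc]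
        rw [List.foldl_cons, hg, List.foldl_cons, hB]
        have := ihj (r ++ pvFlatSp [a, b, c, d, e, f, g] ++ ['\n']) (nb + 1)
        rw [hj1, show 7 * ((j : Int) + 1) = 7 * (j : Int) + 6 + 1 by ring] at this
        exact this
      · have hg : pvStepA numA (r ++ pvFlatSp [a, b, c, d, e, f], 7 * (j : Int) + 6, nb) g
            = (r ++ pvFlatSp [a, b, c, d, e, f, g], 7 * (j : Int) + 6 + 1, nb) := by
          simp [pvStepA, hcnd, pvFlatSp, List.append_assoc]
        have hB : pvStepB numA (r, nb) ((j : Int), [a, b, c, d, e, f, g])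
            = (r ++ pvFlatSp [a, b, c, d, e, f, g], nb) := by
          simp only [pvStepB, hcond]
          simp [hcnd, ← hjoin]
        rw [List.foldl_cons, hg, List.foldl_cons, hB]
        have := ihj (r ++ pvFlatSp [a, b, c, d, e, f, g]) nb
        rw [hj1, show 7 * ((j : Int) + 1) = 7 * (j : Int) + 6 + 1 by ring] at this
        exact this
    · -- short final chunk (or empty)
      rw [not_le] at hlen
      rw [pvChunksShort l hlen]
      rcases l with _ | ⟨x, t⟩
      · simp
      · rw [pvChunkA numA (x :: t) r (7 * (j : Int)) nb (by
          intro i hi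
          have h2 : ((i : Int) + 1) ≤ 6 := by
            simp only [List.length_cons] at hlen hi
            omega
          rw [show 7 * (j : Int) + (i : Int) + 1 = 7 * (j : Int) + ((i : Int) + 1) by ring]
          exact pvModNe (j : Int) ((i : Int) + 1) (by omega) h2)]
        have hlf : ((x :: t).length == 7) = false := by
          rw [beq_eq_false_iff_ne]
          simp only [List.length_cons] at hlen ⊢
          omega
        simp only [if_neg (by simp : ¬ (x :: t = []))]
        rw [PySem.List.enumerate_cons]
        simp only [PySem.List.enumerate, List.foldl_cons, List.foldl_nil, pvStepB, hlf,
          Bool.false_and, Bool.false_eq_true, if_false]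
        rw [pvJoinSp x t]

-- ===== VERDICT (by name: the statement is the Claim_ definition above) =====
theorem code_split_spec : Claim_equal_code_split := by
  intro code isSplit _
  unfold Spec_code_split code_split code_split_alt
  cases isSplit with
  | false => rfl
  | true =>
    rw [if_pos rfl, if_neg (by decide : ¬((!true) = true))]
    have h := pvMain ((PySem.Chars.count code.toList ['\n'] : Int))
      (PySem.Chars.splitOn code.toList ['\n']).length
      (PySem.Chars.splitOn code.toList ['\n']) le_rfl 0 [] 1
    simp only [Nat.cast_zero, mul_zero] at h
    exact congrArg₂ Prod.mk
      (congrArg (fun l => String.mk (l ++ ['\n'])) (congrArg Prod.fst h))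
      (congrArg Prod.snd h)
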